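-- pv_equiv track=rewrite | github.com/EECS337-TAT/GoldenGlobes | Playgound.py | objectSearch
-- ===== SOURCE A (Python) =====
-- def objectSearch(tree, index):
--     searching = True
--     compiling = True
--     object = ""
--
--     while searching and index < len(tree):
--         if "Best" == tree[index][0]:
--             searching = False
--             while index < len(tree):
--                 if False:
--                     compiling = False
--                     break
--                 object = object + tree[index][0] + ' '
--                 index = index + 1
--         index = index+1
--
--     return object
-- ===== SOURCE B (Python) =====
-- def objectSearch(tree, index):
--     result = ""
--     suffix = ""
--     for i in range(len(tree) - 1, index - 1, -1):
--         suffix = tree[i][0] + ' ' + suffix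
--         if tree[i][0] == "Best":
--             result = suffix
--     return result
-- ===== Notes on version B (the rewrite author's own statement) =====
-- stated objective: alternative
-- what changed: Replaces A's forward flag-driven nested while loops by a single backward pass that builds the output back-to-front: one descending loop maintains the suffix join of t[0]+' ' and snapshots it into the result at each 'Best' entry, so the final result is the suffix from the first 'Best' at or after index.
import Mathlib
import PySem

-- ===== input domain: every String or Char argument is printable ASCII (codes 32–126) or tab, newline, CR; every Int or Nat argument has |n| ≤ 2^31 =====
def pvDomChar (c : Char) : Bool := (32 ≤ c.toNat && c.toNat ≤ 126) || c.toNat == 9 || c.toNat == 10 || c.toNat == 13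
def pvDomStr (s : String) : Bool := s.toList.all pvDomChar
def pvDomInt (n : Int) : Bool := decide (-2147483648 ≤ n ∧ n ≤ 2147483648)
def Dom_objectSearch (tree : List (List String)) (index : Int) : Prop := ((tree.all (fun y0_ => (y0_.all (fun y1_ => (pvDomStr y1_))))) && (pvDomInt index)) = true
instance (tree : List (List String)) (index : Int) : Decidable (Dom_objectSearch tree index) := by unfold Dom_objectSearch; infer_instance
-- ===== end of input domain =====

-- B replaces A's forward flag-driven nested while loops by ONE backward pass that builds the
-- output back-to-front with a suffix accumulator, snapshotting it at each "Best" entry.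

-- ===== PORT A =====
-- inner 'while index < len(tree): object += tree[index][0] + ' '; index += 1'
-- (the dead 'if False' branch of A is unreachable and not ported)
def pvInnerA (tree : List (List String)) (index : Int) (object : String) : String :=
  if _h : index < (tree.length : Int) then
    pvInnerA tree (index + 1) (object ++ (PySem.List.pyGetD tree index []).headD "" ++ " ")
  else object
termination_by ((tree.length : Int) - index).toNat
decreasing_by omega

-- outer 'while searching and index < len(tree)' loop; after the inner loop runs,
-- searching is False and index ≥ len(tree), so the outer loop exits with the inner result
def pvOuterA (tree : List (List String)) (index : Int) (object : String) : String :=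
  if _h : index < (tree.length : Int) then
    if "Best" == (PySem.List.pyGetD tree index []).headD "" then
      pvInnerA tree index object
    else pvOuterA tree (index + 1) object
  else object
termination_by ((tree.length : Int) - index).toNat
decreasing_by omega

def objectSearch (tree : List (List String)) (index : Int) : String :=
  pvOuterA tree index ""

-- ===== PORT B =====
-- 'for i in range(len(tree) - 1, index - 1, -1): suffix = tree[i][0] + " " + suffix; if tree[i][0] == "Best": result = suffix'
def objectSearch_alt (tree : List (List String)) (index : Int) : String :=
  ((PySem.List.pyRange ((tree.length : Int) - 1) (index - 1) (-1)).foldl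
      (fun (st : String × String) i =>
        let hd := (PySem.List.pyGetD tree i []).headD ""
        let suffix := hd ++ " " ++ st.2
        (if hd == "Best" then suffix else st.1, suffix))
      ("", "")).1

-- ===== PRECONDITION & SPEC =====
-- Pre_ excludes exactly the inputs on which A raises IndexError at 'tree[i][0]': a start index
-- below -len(tree) (when the loop is entered), or an empty entry at one of the scanned positions
-- (all positions ≥ index for 0 ≤ index, every position when index is negative, by wraparound).
def Pre_objectSearch (tree : List (List String)) (index : Int) : Prop :=
  if 0 ≤ index then
    ∀ j, (hj : j < tree.length) → index ≤ (j : Int) → tree[j] ≠ []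
  else
    -(tree.length : Int) ≤ index ∧ ∀ j, (hj : j < tree.length) → tree[j] ≠ []
instance (tree : List (List String)) (index : Int) : Decidable (Pre_objectSearch tree index) := by
  unfold Pre_objectSearch; infer_instance

def pvWitness_objectSearch : List (List String) × Int := ([["Best"], ["x"]], 0)

def Spec_objectSearch (tree : List (List String)) (index : Int) (out : String) : Prop := out = objectSearch_alt tree index
instance (tree : List (List String)) (index : Int) (out : String) : Decidable (Spec_objectSearch tree index out) := by unfold Spec_objectSearch; infer_instance

-- ===== CLAIM (what is proved, stated in full; the proofs are below) =====
def Claim_equal_objectSearch : Prop := ∀ (tree : List (List String)) (index : Int), Dom_objectSearch tree index → Pre_objectSearch tree index → Spec_objectSearch tree index (objectSearch tree index)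

-- ===== LEMMAS AND PROOFS =====

-- B's loop body as a foldr step (the descending foldl is the foldr over the ascending range)
def pvStepB (tree : List (List String)) (i : Int) (st : String × String) : String × String :=
  let hd := (PySem.List.pyGetD tree i []).headD ""
  let suffix := hd ++ " " ++ st.2
  (if hd == "Best" then suffix else st.1, suffix)

theorem pvJoinCons (s : String) (l : List String) : String.join (s :: l) = s ++ String.join l := by
  simp [String.join_eq]

-- the suffix accumulator is the join of t[0]+' ' over the remaining (ascending) indices
theorem pvFoldr_snd (tree : List (List String)) (L : List Int) :
    (L.foldr (pvStepB tree) ("", "")).2 =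
      String.join (L.map (fun i => (PySem.List.pyGetD tree i []).headD "" ++ " ")) := by
  induction L with
  | nil => simp [String.join]
  | cons x xs ih => simp [pvStepB, ih, pvJoinCons, String.append_assoc]

theorem pvInnerA_eq (tree : List (List String)) (i : Int) (object : String) :
    pvInnerA tree i object =
      object ++ String.join ((PySem.List.pyRange i (tree.length : Int) 1).map
        (fun k => (PySem.List.pyGetD tree k []).headD "" ++ " ")) := by
  by_cases h : i < (tree.length : Int)
  · rw [pvInnerA, dif_pos h, PySem.List.pyRange_one_cons h, List.map_cons, pvJoinCons,
      pvInnerA_eq tree (i + 1)]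
    simp [String.append_assoc]
  · rw [pvInnerA, dif_neg h, PySem.List.pyRange_one_eq_nil (by omega)]
    simp [String.join]
termination_by ((tree.length : Int) - i).toNat
decreasing_by omega

theorem pvOuterA_eq (tree : List (List String)) (i : Int) (object : String) :
    pvOuterA tree i object =
      object ++ ((PySem.List.pyRange i (tree.length : Int) 1).foldr (pvStepB tree) ("", "")).1 := by
  by_cases h : i < (tree.length : Int)
  · rw [pvOuterA, dif_pos h, PySem.List.pyRange_one_cons h, List.foldr_cons]
    by_cases hb : (PySem.List.pyGetD tree i []).head?.getD "" = "Best"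
    · rw [if_pos (by simp [hb]), pvInnerA_eq]
      have h2 := pvFoldr_snd tree (PySem.List.pyRange (i + 1) (tree.length : Int) 1)
      simp [pvStepB, hb, h2]
      rw [PySem.List.pyRange_one_cons h, List.map_cons, pvJoinCons, hb]
      rfl
    · rw [if_neg (by simp; exact fun e => hb e.symm), pvOuterA_eq tree (i + 1)]
      simp [pvStepB, hb]
  · rw [pvOuterA, dif_neg h, PySem.List.pyRange_one_eq_nil (by omega)]
    simp
termination_by ((tree.length : Int) - i).toNat
decreasing_by omega

-- ===== VERDICT (by name: the statement is the Claim_ definition above) =====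
theorem objectSearch_spec : Claim_equal_objectSearch := by
  intro tree index _hdom _hpre
  unfold Spec_objectSearch objectSearch objectSearch_alt
  rw [pvOuterA_eq]
  have hrev : PySem.List.pyRange ((tree.length : Int) - 1) (index - 1) (-1)
      = (PySem.List.pyRange index (tree.length : Int) 1).reverse := by
    rw [PySem.List.pyRange_neg_one_eq_reverse]
    norm_num
  rw [hrev, List.foldl_reverse]
  show _ = ((PySem.List.pyRange index (tree.length : Int) 1).foldr (pvStepB tree) ("", "")).1
  simp
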